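-- pv_equiv track=rewrite | github.com/swestrum/advent_of_code_2022 | day15/day15.py | no_beacons
-- ===== SOURCE A (Python) =====
-- from typing import List, Dict, Any
-- from collections import defaultdict
--
-- def manhattan_distance(x1: int, y1: int, x2: int, y2: int):
--     return abs(x1 - x2) + abs(y1 - y2)
--
-- def no_beacons(parsed_sensors: List[Dict[str, Any]]):
--     no_beacons = defaultdict(lambda:[])
--     for s in parsed_sensors:
--         dist = manhattan_distance(s['sensor'][0], s['sensor'][1], s['beacon'][0], s['beacon'][1])
--         min_no_beacons = s['sensor'][0]
--         max_no_beacons = s['sensor'][0] + 1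
--         for d in range(s['sensor'][1] - dist, s['sensor'][1]):
--             no_beacons_row = (min_no_beacons, max_no_beacons)
--             min_no_beacons -= 1
--             max_no_beacons += 1
--             no_beacons[d].append(no_beacons_row)
--         for d in range(s['sensor'][1], s['sensor'][1] + dist + 1):
--             no_beacons_row = (min_no_beacons, max_no_beacons)
--             min_no_beacons += 1
--             max_no_beacons -=1
--             no_beacons[d].append(no_beacons_row)
--     for s in parsed_sensors:
--         no_beacons[s['sensor'][1]].append((None, s['sensor'][0]))
--         no_beacons[s['beacon'][1]].append((None, s['beacon'][0]))
--     return no_beacons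
-- ===== SOURCE B (Python) =====
-- from typing import List, Dict, Any
-- from collections import defaultdict
--
-- def no_beacons(parsed_sensors: List[Dict[str, Any]]):
--     # Stage 1: materialize a flat (row, entry) event list.
--     events = []
--     for s in parsed_sensors:
--         sx, sy = s['sensor'][0], s['sensor'][1]
--         bx, by = s['beacon'][0], s['beacon'][1]
--         dist = abs(sx - bx) + abs(sy - by)
--         events.extend((d, (sx - (dist - abs(d - sy)), sx + (dist - abs(d - sy)) + 1))
--                       for d in range(sy - dist, sy + dist + 1))
--     for s in parsed_sensors:
--         events.append((s['sensor'][1], (None, s['sensor'][0])))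
--         events.append((s['beacon'][1], (None, s['beacon'][0])))
--     # Stage 2: group events by row, keys in first-occurrence order.
--     result = defaultdict(lambda: [])
--     for d in dict.fromkeys(k for k, _ in events):
--         result[d] = [v for k, v in events if k == d]
--     return result
-- ===== Notes on version B (the rewrite author's own statement) =====
-- stated objective: alternative
-- what changed: A builds the dict incrementally, appending per sensor with mutable min/max accumulators; B first materializes a flat (row, entry) event list in closed form and then groups it by row (distinct rows in first-occurrence order, per-row filter), assigning each row's value list once.
-- outside the precondition, e.g. on no_beacons([{'x': (0, 0)}]): A raises KeyError, B raises KeyError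
import Mathlib
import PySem

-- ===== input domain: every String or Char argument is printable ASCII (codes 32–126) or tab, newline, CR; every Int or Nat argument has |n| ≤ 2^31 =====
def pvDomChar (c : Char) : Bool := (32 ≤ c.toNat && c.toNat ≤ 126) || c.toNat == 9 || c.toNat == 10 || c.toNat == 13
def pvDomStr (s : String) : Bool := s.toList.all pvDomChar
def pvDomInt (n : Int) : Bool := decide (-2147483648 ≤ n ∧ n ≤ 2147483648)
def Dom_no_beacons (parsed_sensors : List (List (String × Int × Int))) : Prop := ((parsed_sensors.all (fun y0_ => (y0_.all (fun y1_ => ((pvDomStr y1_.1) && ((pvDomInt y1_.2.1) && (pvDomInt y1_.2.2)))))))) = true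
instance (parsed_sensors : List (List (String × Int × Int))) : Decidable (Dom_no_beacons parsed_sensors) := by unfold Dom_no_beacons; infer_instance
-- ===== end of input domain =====

-- B replaces A's incremental dict building (per-sensor append loops with mutable
-- min/max accumulators) by two stages: materialize a flat (row, entry) event list in
-- closed form, then group it by row in first-occurrence key order (objective: alternative).

-- ===== PORT A =====
def manhattan_distance (x1 y1 x2 y2 : Int) : Int := |x1 - x2| + |y1 - y2|

-- state of A's inner loops: (min_no_beacons, max_no_beacons, no_beacons dict)
def pvStepA1 (st : Int × Int × PySem.Dict Int (List (Option Int × Int))) (d : Int) :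
    Int × Int × PySem.Dict Int (List (Option Int × Int)) :=
  (st.1 - 1, st.2.1 + 1, st.2.2.modify d [] (fun r => r ++ [(some st.1, st.2.1)]))

def pvStepA2 (st : Int × Int × PySem.Dict Int (List (Option Int × Int))) (d : Int) :
    Int × Int × PySem.Dict Int (List (Option Int × Int)) :=
  (st.1 + 1, st.2.1 - 1, st.2.2.modify d [] (fun r => r ++ [(some st.1, st.2.1)]))

def pvA_sensor_step (nb : PySem.Dict Int (List (Option Int × Int)))
    (s : List (String × Int × Int)) : PySem.Dict Int (List (Option Int × Int)) :=
  let sensor := (((PySem.Dict.mk s).get? "sensor").getD (0, 0))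
  let beacon := (((PySem.Dict.mk s).get? "beacon").getD (0, 0))
  let dist := manhattan_distance sensor.1 sensor.2 beacon.1 beacon.2
  let st := (PySem.List.pyRange (sensor.2 - dist) sensor.2 1).foldl pvStepA1
      (sensor.1, sensor.1 + 1, nb)
  let st2 := (PySem.List.pyRange sensor.2 (sensor.2 + dist + 1) 1).foldl pvStepA2 st
  st2.2.2

def pvA_sentinel_step (nb : PySem.Dict Int (List (Option Int × Int)))
    (s : List (String × Int × Int)) : PySem.Dict Int (List (Option Int × Int)) :=
  let sensor := (((PySem.Dict.mk s).get? "sensor").getD (0, 0))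
  let beacon := (((PySem.Dict.mk s).get? "beacon").getD (0, 0))
  ((nb.modify sensor.2 [] (fun r => r ++ [(none, sensor.1)])).modify beacon.2 []
      (fun r => r ++ [(none, beacon.1)]))

def no_beacons (parsed_sensors : List (List (String × Int × Int))) :
    List (Int × List (Option Int × Int)) :=
  (parsed_sensors.foldl pvA_sentinel_step
    (parsed_sensors.foldl pvA_sensor_step PySem.Dict.empty)).items

-- ===== PORT B =====
-- diamond events of one sensor (Source B's events.extend(... for d in range(...)))
def pvDiamondEvents (s : List (String × Int × Int)) : List (Int × (Option Int × Int)) :=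
  (PySem.List.pyRange
      ((((PySem.Dict.mk s).get? "sensor").getD (0, 0)).2 -
        (|(((PySem.Dict.mk s).get? "sensor").getD (0, 0)).1 - (((PySem.Dict.mk s).get? "beacon").getD (0, 0)).1| +
         |(((PySem.Dict.mk s).get? "sensor").getD (0, 0)).2 - (((PySem.Dict.mk s).get? "beacon").getD (0, 0)).2|))
      ((((PySem.Dict.mk s).get? "sensor").getD (0, 0)).2 +
        (|(((PySem.Dict.mk s).get? "sensor").getD (0, 0)).1 - (((PySem.Dict.mk s).get? "beacon").getD (0, 0)).1| +
         |(((PySem.Dict.mk s).get? "sensor").getD (0, 0)).2 - (((PySem.Dict.mk s).get? "beacon").getD (0, 0)).2|) + 1)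
      1).map
    (fun d =>
      (d, (some ((((PySem.Dict.mk s).get? "sensor").getD (0, 0)).1 -
              ((|(((PySem.Dict.mk s).get? "sensor").getD (0, 0)).1 - (((PySem.Dict.mk s).get? "beacon").getD (0, 0)).1| +
                |(((PySem.Dict.mk s).get? "sensor").getD (0, 0)).2 - (((PySem.Dict.mk s).get? "beacon").getD (0, 0)).2|) -
               |d - (((PySem.Dict.mk s).get? "sensor").getD (0, 0)).2|)),
           (((PySem.Dict.mk s).get? "sensor").getD (0, 0)).1 +
              ((|(((PySem.Dict.mk s).get? "sensor").getD (0, 0)).1 - (((PySem.Dict.mk s).get? "beacon").getD (0, 0)).1| +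
                |(((PySem.Dict.mk s).get? "sensor").getD (0, 0)).2 - (((PySem.Dict.mk s).get? "beacon").getD (0, 0)).2|) -
               |d - (((PySem.Dict.mk s).get? "sensor").getD (0, 0)).2|) + 1)))

-- sentinel events of one sensor (Source B's two appends)
def pvSentinelEvents (s : List (String × Int × Int)) : List (Int × (Option Int × Int)) :=
  [((((PySem.Dict.mk s).get? "sensor").getD (0, 0)).2, (none, (((PySem.Dict.mk s).get? "sensor").getD (0, 0)).1)),
   ((((PySem.Dict.mk s).get? "beacon").getD (0, 0)).2, (none, (((PySem.Dict.mk s).get? "beacon").getD (0, 0)).1))]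

-- Source B stage 1: the flat event list (two appending loops over the sensors)
def pvEvents (parsed_sensors : List (List (String × Int × Int))) : List (Int × (Option Int × Int)) :=
  parsed_sensors.foldl (fun ev s => ev ++ pvDiamondEvents s) [] ++
    parsed_sensors.foldl (fun ev s => ev ++ pvSentinelEvents s) []

-- Source B stage 2: group by row; keys via dict.fromkeys (first occurrences), each row assigned once
def no_beacons_alt (parsed_sensors : List (List (String × Int × Int))) :
    List (Int × List (Option Int × Int)) :=
  ((PySem.List.dedup ((pvEvents parsed_sensors).map Prod.fst)).foldl
      (fun r d => r.insert d (((pvEvents parsed_sensors).filter (fun p => p.1 == d)).map Prod.snd))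
      PySem.Dict.empty).items

-- ===== PRECONDITION & SPEC =====
-- Pre_ excludes exactly the inputs on which Python A raises KeyError: a sensor dict
-- missing the key 'sensor' or 'beacon'.
def Pre_no_beacons (parsed_sensors : List (List (String × Int × Int))) : Prop :=
  ∀ s ∈ parsed_sensors, "sensor" ∈ s.map Prod.fst ∧ "beacon" ∈ s.map Prod.fst
instance (parsed_sensors : List (List (String × Int × Int))) : Decidable (Pre_no_beacons parsed_sensors) := by unfold Pre_no_beacons; infer_instance

def pvWitness_no_beacons : (List (List (String × Int × Int))) :=
  [[("sensor", 2, 3), ("beacon", 4, 3)]]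

def Spec_no_beacons (parsed_sensors : List (List (String × Int × Int))) (out : List (Int × List (Option Int × Int))) : Prop := out = no_beacons_alt parsed_sensors
instance (parsed_sensors : List (List (String × Int × Int))) (out : List (Int × List (Option Int × Int))) : Decidable (Spec_no_beacons parsed_sensors out) := by unfold Spec_no_beacons; infer_instance

-- ===== CLAIM (what is proved, stated in full; the proofs are below) =====
def Claim_equal_no_beacons : Prop := ∀ (parsed_sensors : List (List (String × Int × Int))), Dom_no_beacons parsed_sensors → Pre_no_beacons parsed_sensors → Spec_no_beacons parsed_sensors (no_beacons parsed_sensors)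

-- ===== LEMMAS AND PROOFS =====

-- proof-side: apply a list of (row, entry) events to the dict, one modify-append each
def pvApplyEv (nb : PySem.Dict Int (List (Option Int × Int)))
    (es : List (Int × (Option Int × Int))) : PySem.Dict Int (List (Option Int × Int)) :=
  es.foldl (fun nb p => nb.modify p.1 [] (fun r => r ++ [p.2])) nb

-- the closed-form step A's inner loops amount to
def pvStepE (sx sy dist : Int) (nb : PySem.Dict Int (List (Option Int × Int))) (d : Int) :
    PySem.Dict Int (List (Option Int × Int)) :=
  nb.modify d [] (fun r => r ++ [(some (sx - (dist - |d - sy|)), sx + (dist - |d - sy|) + 1)])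

-- A's first inner loop (rows above the sensor row), accumulators expressed through the bound
lemma pv_loop1 (sx sy dist : Int) (lo : Int) (h1 : sy - dist ≤ lo) (h2 : lo ≤ sy)
    (nb : PySem.Dict Int (List (Option Int × Int))) :
    (PySem.List.pyRange lo sy 1).foldl pvStepA1
      (sx - (lo - (sy - dist)), sx + (lo - (sy - dist)) + 1, nb)
    = (sx - dist, sx + dist + 1, (PySem.List.pyRange lo sy 1).foldl (pvStepE sx sy dist) nb) := by
  induction hn : (sy - lo).toNat generalizing lo nb with
  | zero =>
    have hls : lo = sy := by omega
    subst hls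
    rw [PySem.List.pyRange_one_eq_nil (le_refl lo)]
    simp only [List.foldl_nil]
    refine congrArg₂ Prod.mk (by ring) (congrArg₂ Prod.mk (by ring) rfl)
  | succ n ih =>
    have hlt : lo < sy := by omega
    rw [PySem.List.pyRange_one_cons hlt]
    simp only [List.foldl_cons]
    have eA : pvStepA1 (sx - (lo - (sy - dist)), sx + (lo - (sy - dist)) + 1, nb) lo
        = (sx - (lo + 1 - (sy - dist)), sx + (lo + 1 - (sy - dist)) + 1,
           pvStepE sx sy dist nb lo) := by
      simp only [pvStepA1, pvStepE]
      have habs : |lo - sy| = sy - lo := by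
        rw [abs_of_nonpos (by omega)]; ring
      rw [habs]
      refine congrArg₂ Prod.mk (by ring) (congrArg₂ Prod.mk (by ring) ?_)
      have e1 : sx - (lo - (sy - dist)) = sx - (dist - (sy - lo)) := by ring
      have e2 : sx + (lo - (sy - dist)) + 1 = sx + (dist - (sy - lo)) + 1 := by ring
      rw [e1, e2]
    rw [eA]
    exact ih (lo + 1) (by omega) (by omega) (pvStepE sx sy dist nb lo) (by omega)

-- A's second inner loop (the sensor row and rows below it) likewise
lemma pv_loop2 (sx sy dist : Int) (lo : Int) (h1 : sy ≤ lo) (h2 : lo ≤ sy + dist + 1)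
    (nb : PySem.Dict Int (List (Option Int × Int))) :
    (PySem.List.pyRange lo (sy + dist + 1) 1).foldl pvStepA2
      (sx - dist + (lo - sy), sx + dist + 1 - (lo - sy), nb)
    = (sx + 1, sx, (PySem.List.pyRange lo (sy + dist + 1) 1).foldl (pvStepE sx sy dist) nb) := by
  induction hn : (sy + dist + 1 - lo).toNat generalizing lo nb with
  | zero =>
    have hls : lo = sy + dist + 1 := by omega
    subst hls
    rw [PySem.List.pyRange_one_eq_nil (le_refl _)]
    simp only [List.foldl_nil]
    refine congrArg₂ Prod.mk (by ring) (congrArg₂ Prod.mk (by ring) rfl)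
  | succ n ih =>
    have hlt : lo < sy + dist + 1 := by omega
    rw [PySem.List.pyRange_one_cons hlt]
    simp only [List.foldl_cons]
    have eA : pvStepA2 (sx - dist + (lo - sy), sx + dist + 1 - (lo - sy), nb) lo
        = (sx - dist + (lo + 1 - sy), sx + dist + 1 - (lo + 1 - sy),
           pvStepE sx sy dist nb lo) := by
      simp only [pvStepA2, pvStepE]
      have habs : |lo - sy| = lo - sy := abs_of_nonneg (by omega)
      rw [habs]
      refine congrArg₂ Prod.mk (by ring) (congrArg₂ Prod.mk (by ring) ?_)
      have e1 : sx - dist + (lo - sy) = sx - (dist - (lo - sy)) := by ring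
      have e2 : sx + dist + 1 - (lo - sy) = sx + (dist - (lo - sy)) + 1 := by ring
      rw [e1, e2]
    rw [eA]
    exact ih (lo + 1) (by omega) (by omega) (pvStepE sx sy dist nb lo) (by omega)

-- per sensor, A's pair of loops applies exactly the sensor's diamond events
lemma pv_sensor_step_eq (nb : PySem.Dict Int (List (Option Int × Int)))
    (s : List (String × Int × Int)) :
    pvA_sensor_step nb s = pvApplyEv nb (pvDiamondEvents s) := by
  simp only [pvA_sensor_step, pvDiamondEvents, pvApplyEv, manhattan_distance, List.foldl_map]
  set sx := (((PySem.Dict.mk s).get? "sensor").getD (0, 0)).1 with hsx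
  set sy := (((PySem.Dict.mk s).get? "sensor").getD (0, 0)).2 with hsy
  set bx := (((PySem.Dict.mk s).get? "beacon").getD (0, 0)).1 with hbx
  set by' := (((PySem.Dict.mk s).get? "beacon").getD (0, 0)).2 with hby
  set dist := |sx - bx| + |sy - by'| with hdist
  have hd0 : 0 ≤ dist := by positivity
  have e0 : ((sx : Int), sx + 1, nb)
      = (sx - ((sy - dist) - (sy - dist)), sx + ((sy - dist) - (sy - dist)) + 1, nb) := by
    refine congrArg₂ Prod.mk (by ring) (congrArg₂ Prod.mk (by ring) rfl)
  rw [e0, pv_loop1 sx sy dist (sy - dist) (le_refl _) (by omega) nb]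
  have e1 : ((sx - dist : Int), sx + dist + 1,
      (PySem.List.pyRange (sy - dist) sy 1).foldl (pvStepE sx sy dist) nb)
      = (sx - dist + (sy - sy), sx + dist + 1 - (sy - sy),
         (PySem.List.pyRange (sy - dist) sy 1).foldl (pvStepE sx sy dist) nb) := by
    refine congrArg₂ Prod.mk (by ring) (congrArg₂ Prod.mk (by ring) rfl)
  rw [e1, pv_loop2 sx sy dist sy (le_refl _) (by omega)]
  rw [PySem.List.pyRange_one_append (sy - dist) sy (sy + dist + 1) (by omega) (by omega),
      List.foldl_append]
  rfl

-- folding per-chunk application over the list = applying the concatenated events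
lemma pv_applyEv_foldl (g : List (String × Int × Int) → List (Int × (Option Int × Int)))
    (ps : List (List (String × Int × Int)))
    (nb : PySem.Dict Int (List (Option Int × Int))) :
    ps.foldl (fun nb s => pvApplyEv nb (g s)) nb
      = pvApplyEv nb (ps.foldl (fun ev s => ev ++ g s) []) := by
  rw [PySem.List.foldl_append_eq_flatMap]
  simp only [List.nil_append]
  induction ps generalizing nb with
  | nil => rfl
  | cons a t ih =>
    simp only [List.foldl_cons, List.flatMap_cons]
    rw [ih (pvApplyEv nb (g a))]
    simp [pvApplyEv, List.foldl_append]

-- ===== VERDICT (by name: the statement is the Claim_ definition above) =====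
theorem no_beacons_spec : Claim_equal_no_beacons := by
  intro ps _ _
  unfold Spec_no_beacons no_beacons no_beacons_alt
  -- A's whole computation is applying the event list of B's stage 1
  have hA : (ps.foldl pvA_sentinel_step (ps.foldl pvA_sensor_step PySem.Dict.empty))
      = pvApplyEv PySem.Dict.empty (pvEvents ps) := by
    have h1 : ps.foldl pvA_sensor_step PySem.Dict.empty
        = ps.foldl (fun nb s => pvApplyEv nb (pvDiamondEvents s)) PySem.Dict.empty := by
      congr 1; funext nb s; exact pv_sensor_step_eq nb s
    have h2 : ∀ X, ps.foldl pvA_sentinel_step X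
        = ps.foldl (fun nb s => pvApplyEv nb (pvSentinelEvents s)) X := by
      intro X; rfl
    rw [h1]
    rw [h2 _]
    rw [pv_applyEv_foldl pvSentinelEvents ps]
    rw [pv_applyEv_foldl pvDiamondEvents ps PySem.Dict.empty]
    simp [pvEvents, pvApplyEv]
  rw [hA]
  -- characterize both dicts through keys and lookups
  have hnodupA : (pvApplyEv PySem.Dict.empty (pvEvents ps)).keys.Nodup := by
    unfold pvApplyEv
    exact PySem.Dict.nodup_keys_foldl_modify_key (pvEvents ps) Prod.fst []
      (fun d x => fun r => r ++ [x.2]) PySem.Dict.empty PySem.Dict.nodup_keys_empty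
  have hkeysA : (pvApplyEv PySem.Dict.empty (pvEvents ps)).keys
      = PySem.List.dedup ((pvEvents ps).map Prod.fst) := by
    unfold pvApplyEv
    rw [PySem.Dict.keys_foldl_modify_key (pvEvents ps) Prod.fst []
      (fun d x => fun r => r ++ [x.2]) PySem.Dict.empty]
    simp [PySem.Set.update, PySem.Set.ofList_eq_foldl, PySem.Dict.keys_empty]
  have hitemsA : (pvApplyEv PySem.Dict.empty (pvEvents ps)).items
      = (pvApplyEv PySem.Dict.empty (pvEvents ps)).keys.map
          (fun k => (k, (pvApplyEv PySem.Dict.empty (pvEvents ps)).getD k [])) :=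
    PySem.Dict.items_eq_map_keys _ hnodupA []
  have hgetA : ∀ k, (pvApplyEv PySem.Dict.empty (pvEvents ps)).getD k []
      = (((pvEvents ps).filter (fun p => p.1 == k)).map Prod.snd) := by
    intro k
    unfold pvApplyEv
    rw [PySem.Dict.getD_foldl_modify_append]
    simp [PySem.Dict.getD_empty]
  -- B's fold inserts each distinct key once, over the empty dict
  have hB : ((PySem.List.dedup ((pvEvents ps).map Prod.fst)).foldl
      (fun r d => r.insert d (((pvEvents ps).filter (fun p => p.1 == d)).map Prod.snd))
      PySem.Dict.empty).items
      = (PySem.List.dedup ((pvEvents ps).map Prod.fst)).map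
          (fun d => (d, (((pvEvents ps).filter (fun p => p.1 == d)).map Prod.snd))) := by
    have := PySem.Dict.items_foldl_insert_fresh
      (l := PySem.List.dedup ((pvEvents ps).map Prod.fst))
      (k := fun d => d)
      (v := fun d => (((pvEvents ps).filter (fun p => p.1 == d)).map Prod.snd))
      (d := PySem.Dict.empty)
      (by intro a _; exact PySem.Dict.contains_empty a)
      (by simp)
    simpa using this
  rw [hB, hitemsA, hkeysA]
  exact List.map_congr_left (fun k _ => by rw [hgetA k])
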